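-- pv_equiv track=rewrite | github.com/Chowewow/chowsRep | pythons/A2_22575612.py | valid_words_mask
-- ===== SOURCE A (Python) =====
-- def tokenization(sentence):
--     '''returns strings in sentence as a list'''
--     return sentence.split()
--
-- def valid_words_mask(sentence):
--     '''returns the number of valid words'''
--     words = tokenization(sentence)
--     count = 0
--     bool_list = []
--     for word in words:
--         dashcount = 0
--         next_bool = True
--
--         if not word[-1].isascii() or word[-1].isdigit():
--             bool_list.append(False)
--             continue
--
--         if word[-1] == '-' or word[0] == '-':
--             bool_list.append(False)
--             continue
--
--         for lett in word[0:-1]: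
--             if not lett.isalpha():
--                 if lett == '-' and dashcount == 0:
--                     dashcount += 1
--                     continue
--                 next_bool = False
--                 break
--
--         if next_bool is False:
--             bool_list.append(next_bool)
--             continue
--         count += 1
--         bool_list.append(next_bool)
--     return (count, bool_list)
-- ===== SOURCE B (Python) =====
-- def valid_words_mask(sentence):
--     '''returns the number of valid words'''
--     # Streaming finite-state scan over the characters; never builds the word list.
--     # cur = (first char, latest char, dashes seen in the body so far, body-all-alpha-or-dash so far)
--     def finish(cur):
--         first, prev, dashes, body_ok = cur
--         return (prev.isascii() and not prev.isdigit() and prev != '-'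
--                 and first != '-' and body_ok and dashes <= 1)
--     count, mask, cur = 0, [], None
--     for c in sentence:
--         if c.isspace():
--             if cur is not None:
--                 ok = finish(cur)
--                 mask.append(ok)
--                 count += ok
--                 cur = None
--         elif cur is None:
--             cur = (c, c, 0, True)
--         else:
--             first, prev, dashes, body_ok = cur
--             if prev == '-':
--                 dashes += 1
--             elif not prev.isalpha():
--                 body_ok = False
--             cur = (first, c, dashes, body_ok)
--     if cur is not None:
--         ok = finish(cur)
--         mask.append(ok)
--         count += ok
--     return (count, mask)
-- ===== Notes on version B (the rewrite author's own statement) =====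
-- stated objective: alternative
-- what changed: Replaces A's split-into-a-word-list plus a per-word loop with an inner character loop by a single streaming character-level state machine over the raw sentence that never materialises the word list: it carries (first char, latest char, body dash count, body-ok flag) per word and finalises each word when whitespace or the end of input is reached.
import Mathlib
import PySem

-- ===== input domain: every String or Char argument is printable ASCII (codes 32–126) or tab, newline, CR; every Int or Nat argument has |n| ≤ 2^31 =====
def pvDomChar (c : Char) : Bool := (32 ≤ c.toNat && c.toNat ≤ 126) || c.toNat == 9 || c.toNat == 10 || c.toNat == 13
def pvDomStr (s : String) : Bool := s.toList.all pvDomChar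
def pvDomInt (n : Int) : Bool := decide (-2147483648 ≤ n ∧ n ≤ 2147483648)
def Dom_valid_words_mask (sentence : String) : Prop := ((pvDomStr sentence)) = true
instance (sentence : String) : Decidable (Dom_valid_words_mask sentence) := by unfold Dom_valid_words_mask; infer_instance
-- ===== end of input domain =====

-- B replaces A's split-into-words + per-word loops by one streaming character-level
-- state machine that never builds the word list; objective: alternative.

-- ===== PORT A =====
-- A's inner 'for lett in word[0:-1]' loop with its dashcount state and break.
def vwmInner : List Char → Nat → Bool
  | [], _ => true
  | c :: rest, dashcount =>
    if !(PySem.Chars.isalpha c) then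
      if c == '-' && dashcount == 0 then vwmInner rest (dashcount + 1)
      else false
    else vwmInner rest dashcount

-- one iteration of A's 'for word in words' loop over the state (count, bool_list);
-- word[-1]/word[0] via pyGet? (the none branch is unreachable: split() yields nonempty words);
-- '.isascii()' is ported by hand as codepoint < 128, which is exact.
def vwmStep (st : Int × List Bool) (word : String) : Int × List Bool :=
  match PySem.Str.pyGet? word (-1), PySem.Str.pyGet? word 0 with
  | some last, some first =>
    if !(decide (last.toNat < 128)) || PySem.Chars.isdigit last then (st.1, st.2 ++ [false])
    else if last == '-' || first == '-' then (st.1, st.2 ++ [false])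
    else
      let next_bool := vwmInner (PySem.Str.slice word none (some (-1))).toList 0
      if next_bool = false then (st.1, st.2 ++ [false])
      else (st.1 + 1, st.2 ++ [true])
  | _, _ => (st.1, st.2 ++ [false])

def valid_words_mask (sentence : String) : Int × List Bool :=
  (PySem.Str.split₀ sentence).foldl vwmStep (0, [])

-- ===== PORT B =====
-- B's finish(cur): cur = (first, prev, dashes, body_ok); '.isascii()' ported as codepoint < 128 (exact).
def vwmFinish : Char × Char × Nat × Bool → Bool
  | (first, prev, dashes, body_ok) =>
    decide (prev.toNat < 128) && !(PySem.Chars.isdigit prev) && prev != '-' && first != '-'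
      && body_ok && decide (dashes ≤ 1)

-- B's single 'for c in sentence' loop plus the trailing finalisation; the running word
-- state cur is Option (first, prev, dashes, body_ok) exactly as in Source B (None ↔ none).
def vwmScan : List Char → Int × List Bool → Option (Char × Char × Nat × Bool) → Int × List Bool
  | [], (count, mask), cur =>
    match cur with
    | none => (count, mask)
    | some c => (count + (if vwmFinish c then 1 else 0), mask ++ [vwmFinish c])
  | ch :: rest, (count, mask), cur =>
    if PySem.Chars.isspace ch then
      match cur with
      | none => vwmScan rest (count, mask) none
      | some c => vwmScan rest (count + (if vwmFinish c then 1 else 0), mask ++ [vwmFinish c]) none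
    else
      match cur with
      | none => vwmScan rest (count, mask) (some (ch, ch, 0, true))
      | some (first, prev, dashes, bok) =>
        vwmScan rest (count, mask)
          (some (first, ch,
            (if prev == '-' then dashes + 1 else dashes),
            (if prev == '-' then bok else if !(PySem.Chars.isalpha prev) then false else bok)))

def valid_words_mask_alt (sentence : String) : Int × List Bool :=
  vwmScan sentence.toList (0, []) none

-- ===== PRECONDITION & SPEC =====
def Spec_valid_words_mask (sentence : String) (out : Int × List Bool) : Prop := out = valid_words_mask_alt sentence
instance (sentence : String) (out : Int × List Bool) : Decidable (Spec_valid_words_mask sentence out) := by unfold Spec_valid_words_mask; infer_instance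

-- ===== CLAIM =====
def Claim_equal_valid_words_mask : Prop := ∀ (sentence : String), Dom_valid_words_mask sentence → Spec_valid_words_mask sentence (valid_words_mask sentence)

-- ===== LEMMAS AND PROOFS =====

-- the body predicate: alpha or dash
def vwmBodyP (c : Char) : Bool := PySem.Chars.isalpha c || c == '-'

-- per-word validity on a word given as a char list, in A's guard shape
def vwmIsValidL (w : List Char) : Bool :=
  match w.getLast?, w.head? with
  | some last, some first =>
    if !(decide (last.toNat < 128)) || PySem.Chars.isdigit last then false
    else if last == '-' || first == '-' then false
    else decide (w.dropLast.count '-' <= 1) && w.dropLast.all vwmBodyP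
  | _, _ => false

-- B's in-word state for an accumulated (nonempty) word prefix
def vwmStOf : List Char -> Option (Char × Char × Nat × Bool)
  | [] => none
  | a :: t => some (a, (a :: t).getLast (by simp), ((a :: t).dropLast).count '-',
                    ((a :: t).dropLast).all vwmBodyP)

lemma vwmDashNotAlpha : PySem.Chars.isalpha '-' = false := by decide

-- unfolding lemmas for split₀.go
lemma vwmGo_nil (cur : List Char) (acc : List (List Char)) :
    PySem.Chars.split₀.go [] cur acc =
      if cur.isEmpty then acc.reverse else (cur.reverse :: acc).reverse := by
  rw [PySem.Chars.split₀.go.eq_def]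

lemma vwmGo_cons (c : Char) (rest cur : List Char) (acc : List (List Char)) :
    PySem.Chars.split₀.go (c :: rest) cur acc =
      if PySem.Chars.isspace c then
        (if cur.isEmpty then PySem.Chars.split₀.go rest [] acc
         else PySem.Chars.split₀.go rest [] (cur.reverse :: acc))
      else PySem.Chars.split₀.go rest (c :: cur) acc := by
  rw [PySem.Chars.split₀.go.eq_def]

-- A's inner loop computes 'at most one dash (counting dashcount) and all chars alpha-or-dash'.
lemma vwmInner_eq (body : List Char) (dc : Nat) (hdc : dc <= 1) :
    vwmInner body dc = (decide (body.count '-' + dc <= 1) && body.all vwmBodyP) := by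
  induction body generalizing dc with
  | nil => simp [vwmInner, hdc]
  | cons c rest ih =>
    rw [vwmInner]
    by_cases ha : PySem.Chars.isalpha c = true
    · have hd : c ≠ '-' := by
        intro h; rw [h, vwmDashNotAlpha] at ha; exact Bool.noConfusion ha
      rw [if_neg (by simp [ha]), ih dc hdc]
      simp [List.all_cons, vwmBodyP, ha, hd]
    · have ha' : PySem.Chars.isalpha c = false := by simpa using ha
      rw [if_pos (by simp [ha'])]
      by_cases hd : c = '-'
      · subst hd
        by_cases h0 : dc = 0
        · subst h0
          rw [if_pos (by decide), ih 1 (by omega)]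
          simp [List.all_cons, vwmBodyP, ha']
        · rw [if_neg (by simp [h0])]
          have h1 : dc = 1 := by omega
          subst h1
          have hc : ¬ (rest.count '-' + 1 + 1 <= 1) := by omega
          simp [hc]
      · rw [if_neg (by simp [hd])]
        simp [List.all_cons, vwmBodyP, ha', hd]

-- one iteration of A's word loop appends exactly vwmIsValidL of the word and counts it.
lemma vwmStep_eq (st : Int × List Bool) (w : String) :
    vwmStep st w = (st.1 + (if vwmIsValidL w.toList then 1 else 0),
                    st.2 ++ [vwmIsValidL w.toList]) := by
  unfold vwmStep vwmIsValidL
  have h1 : PySem.Str.pyGet? w (-1) = w.toList.getLast? := by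
    simp [PySem.List.pyGet?_neg_one]
  have h0 : PySem.Str.pyGet? w 0 = w.toList.head? := by
    simp [PySem.List.pyGet?_zero, List.head?_eq_getElem?]
  have hs : (PySem.Str.slice w none (some (-1))).toList = w.toList.dropLast := by
    simp [PySem.List.slice_to_neg_one]
  rw [h1, h0, hs]
  cases hL : w.toList.getLast? with
  | none => simp
  | some last =>
    cases hH : w.toList.head? with
    | none => simp
    | some first =>
      dsimp only
      by_cases hA : (!(decide (last.toNat < 128)) || PySem.Chars.isdigit last) = true
      · simp [hA]
      · simp only [Bool.not_eq_true] at hA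
        simp only [hA, Bool.false_eq_true, if_false]
        by_cases hB : (last == '-' || first == '-') = true
        · simp [hB]
        · simp only [Bool.not_eq_true] at hB
          simp only [hB, Bool.false_eq_true, if_false]
          rw [vwmInner_eq _ 0 (by omega)]
          simp only [Nat.add_zero]
          cases hb : (decide (w.toList.dropLast.count '-' <= 1) && w.toList.dropLast.all vwmBodyP) with
          | false => simp [hb]
          | true => simp [hb]

-- A's fold over the word list, with a general accumulator.
lemma vwm_fold (ws : List String) (count : Int) (bl : List Bool) :
    ws.foldl vwmStep (count, bl) =
      (count + (((ws.map (fun w => vwmIsValidL w.toList)).count true : Nat) : Int),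
        bl ++ ws.map (fun w => vwmIsValidL w.toList)) := by
  induction ws generalizing count bl with
  | nil => simp
  | cons w rest ih =>
    simp only [List.foldl_cons, List.map_cons, List.count_cons]
    rw [vwmStep_eq, ih]
    cases h : vwmIsValidL w.toList
    · simp [h]
    · refine Prod.ext ?_ ?_
      · simp [h]; push_cast; ring
      · simp [h]

-- split₀.go appends completed words to acc (reversed); pull acc out front.
lemma vwmGo_acc (cs : List Char) : ∀ (cur : List Char) (acc : List (List Char)),
    PySem.Chars.split₀.go cs cur acc = acc.reverse ++ PySem.Chars.split₀.go cs cur [] := by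
  induction cs with
  | nil =>
    intro cur acc
    rw [vwmGo_nil, vwmGo_nil]
    cases cur <;> simp
  | cons c rest ih =>
    intro cur acc
    rw [vwmGo_cons, vwmGo_cons]
    by_cases hsp : PySem.Chars.isspace c = true
    · rw [if_pos hsp, if_pos hsp]
      cases cur with
      | nil => simp only [List.isEmpty_nil, if_true]; exact ih [] acc
      | cons a b =>
        simp only [List.isEmpty_cons, if_false, Bool.false_eq_true]
        rw [ih [] ((a :: b).reverse :: acc), ih [] [(a :: b).reverse]]
        simp
    · rw [if_neg hsp, if_neg hsp]
      exact ih _ acc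

-- B's finish agrees with vwmIsValidL on a nonempty word (Bool shape shuffling).
lemma vwmBoolShape (b1 b2 b3 b4 b5 b6 : Bool) :
    (b1 && !b2 && !b3 && !b4 && b6 && b5) =
      (if (!b1 || b2) then false else if (b3 || b4) then false else (b5 && b6)) := by
  cases b1 <;> cases b2 <;> cases b3 <;> cases b4 <;> cases b5 <;> cases b6 <;> rfl

lemma vwmFinish_eq (a : Char) (t : List Char) :
    vwmFinish (a, (a :: t).getLast (by simp), ((a :: t).dropLast).count '-',
               ((a :: t).dropLast).all vwmBodyP) = vwmIsValidL (a :: t) := by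
  have hL : (a :: t).getLast? = some ((a :: t).getLast (by simp)) := by
    simp [List.getLast?_eq_some_getLast]
  unfold vwmIsValidL
  rw [hL]
  simp only [List.head?_cons]
  rw [vwmFinish]
  simp only [bne]
  exact vwmBoolShape _ _ _ _ _ _

-- the state update of B matches extending the accumulated word by one char
lemma vwmStOf_snoc (a : Char) (t : List Char) (ch : Char) :
    (some ((a : Char), ch,
        (if (a :: t).getLast (by simp) == '-' then ((a :: t).dropLast).count '-' + 1
         else ((a :: t).dropLast).count '-'),
        (if (a :: t).getLast (by simp) == '-' then ((a :: t).dropLast).all vwmBodyP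
         else if !(PySem.Chars.isalpha ((a :: t).getLast (by simp))) then false
         else ((a :: t).dropLast).all vwmBodyP)) : Option (Char × Char × Nat × Bool))
      = vwmStOf (a :: (t ++ [ch])) := by
  have hsplit : (a :: t).dropLast ++ [(a :: t).getLast (by simp)] = a :: t :=
    List.dropLast_append_getLast (by simp)
  have hgl : (a :: (t ++ [ch])).getLast (by simp) = ch := by
    have h1 : (a :: (t ++ [ch])).getLast? = some ch := by
      rw [show a :: (t ++ [ch]) = (a :: t) ++ [ch] by simp, List.getLast?_concat]
    have h2 : (a :: (t ++ [ch])).getLast? = some ((a :: (t ++ [ch])).getLast (by simp)) := by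
      simp [List.getLast?_eq_some_getLast]
    rw [h1] at h2
    exact (Option.some.inj h2).symm
  have hdl : (a :: (t ++ [ch])).dropLast = a :: t := by
    rw [show a :: (t ++ [ch]) = (a :: t) ++ [ch] by simp]
    exact List.dropLast_concat ..
  have hR : vwmStOf (a :: (t ++ [ch])) =
      some (a, (a :: (t ++ [ch])).getLast (by simp),
            ((a :: (t ++ [ch])).dropLast).count '-',
            ((a :: (t ++ [ch])).dropLast).all vwmBodyP) := rfl
  rw [hR, hgl, hdl]
  have hcount : (a :: t).count '-' =
      ((a :: t).dropLast).count '-' + (if (a :: t).getLast (by simp) == '-' then 1 else 0) := by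
    conv_lhs => rw [← hsplit]
    simp [List.count_append, List.count_cons]
  have hall : (a :: t).all vwmBodyP =
      (((a :: t).dropLast).all vwmBodyP && vwmBodyP ((a :: t).getLast (by simp))) := by
    conv_lhs => rw [← hsplit]
    simp
  refine congrArg some ?_
  refine Prod.ext rfl (Prod.ext rfl (Prod.ext ?_ ?_))
  · dsimp only
    rw [hcount]
    by_cases h : ((a :: t).getLast (by simp) == '-') = true <;> simp [h]
  · dsimp only
    rw [hall]
    by_cases h : ((a :: t).getLast (by simp) == '-') = true
    · have hb : vwmBodyP ((a :: t).getLast (by simp)) = true := by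
        simp [vwmBodyP, h]
      rw [if_pos h, hb, Bool.and_true]
    · have h' : ((a :: t).getLast (by simp) == '-') = false := by
        simp only [Bool.not_eq_true] at h
        exact h
      have hb : vwmBodyP ((a :: t).getLast (by simp)) =
          PySem.Chars.isalpha ((a :: t).getLast (by simp)) := by
        simp [vwmBodyP, h']
      rw [if_neg (by simp [h']), hb]
      cases ha : PySem.Chars.isalpha ((a :: t).getLast (by simp)) with
      | true => simp [ha]
      | false => simp [ha]

-- MAIN: B's scan from any word-prefix state equals mapping vwmIsValidL over the rest's words.
lemma vwmScan_eq (cs : List Char) : ∀ (count : Int) (mask : List Bool) (w : List Char),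
    vwmScan cs (count, mask) (vwmStOf w) =
      (count + (((PySem.Chars.split₀.go cs w.reverse []).map vwmIsValidL).count true : Nat),
       mask ++ (PySem.Chars.split₀.go cs w.reverse []).map vwmIsValidL) := by
  induction cs with
  | nil =>
    intro count mask w
    rw [vwmGo_nil]
    cases w with
    | nil => simp [vwmScan, vwmStOf]
    | cons a t =>
      rw [if_neg (by simp)]
      rw [show vwmStOf (a :: t) = some (a, (a :: t).getLast (by simp),
            ((a :: t).dropLast).count '-', ((a :: t).dropLast).all vwmBodyP) from rfl]
      simp only [vwmScan, List.reverse_reverse, List.reverse_cons, List.reverse_nil,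
        List.nil_append]
      rw [vwmFinish_eq]
      cases h : vwmIsValidL (a :: t) <;> simp [h]
  | cons c rest ih =>
    intro count mask w
    rw [vwmGo_cons]
    by_cases hsp : PySem.Chars.isspace c = true
    · rw [if_pos hsp]
      cases w with
      | nil =>
        simp only [List.reverse_nil, List.isEmpty_nil, if_true]
        have hstep : vwmScan (c :: rest) (count, mask) (vwmStOf []) =
            vwmScan rest (count, mask) none := by
          simp [vwmScan, vwmStOf, hsp]
        rw [hstep, show (none : Option (Char × Char × Nat × Bool)) = vwmStOf [] from rfl,
            ih count mask []]
        simp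
      | cons a t =>
        rw [if_neg (by simp)]
        have hstep : vwmScan (c :: rest) (count, mask) (vwmStOf (a :: t)) =
            vwmScan rest (count + (if vwmIsValidL (a :: t) then 1 else 0),
              mask ++ [vwmIsValidL (a :: t)]) none := by
          rw [show vwmStOf (a :: t) = some (a, (a :: t).getLast (by simp),
                ((a :: t).dropLast).count '-', ((a :: t).dropLast).all vwmBodyP) from rfl]
          simp only [vwmScan, hsp, if_true]
          rw [vwmFinish_eq]
        rw [hstep, show (none : Option (Char × Char × Nat × Bool)) = vwmStOf [] from rfl,
            ih _ _ []]
        rw [vwmGo_acc rest [] [(a :: t).reverse.reverse]]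
        simp only [List.reverse_reverse, List.reverse_cons, List.reverse_nil, List.nil_append,
          List.map_append, List.map_cons, List.map_nil, List.count_append, List.count_cons,
          List.singleton_append]
        refine Prod.ext ?_ ?_
        · cases h : vwmIsValidL (a :: t) <;> simp [h] <;> push_cast <;> ring
        · simp
    · rw [if_neg hsp]
      cases w with
      | nil =>
        have hstep : vwmScan (c :: rest) (count, mask) (vwmStOf []) =
            vwmScan rest (count, mask) (some (c, c, 0, true)) := by
          simp [vwmScan, vwmStOf, hsp]
        have hst : (some (c, c, 0, true) : Option (Char × Char × Nat × Bool)) = vwmStOf [c] := by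
          simp [vwmStOf]
        rw [hstep, hst, ih count mask [c]]
        simp
      | cons a t =>
        have hstep : vwmScan (c :: rest) (count, mask) (vwmStOf (a :: t)) =
            vwmScan rest (count, mask) (vwmStOf (a :: (t ++ [c]))) := by
          rw [show vwmStOf (a :: t) = some (a, (a :: t).getLast (by simp),
                ((a :: t).dropLast).count '-', ((a :: t).dropLast).all vwmBodyP) from rfl]
          simp only [vwmScan]
          rw [if_neg hsp]
          exact congrArg _ (vwmStOf_snoc a t c)
        rw [hstep, ih count mask (a :: (t ++ [c]))]
        have hrev : (a :: (t ++ [c])).reverse = c :: (a :: t).reverse := by simp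
        rw [hrev]

-- ===== VERDICT (by name: the statement is the Claim_ definition above) =====
theorem valid_words_mask_spec : Claim_equal_valid_words_mask := by
  intro sentence _
  unfold Spec_valid_words_mask valid_words_mask valid_words_mask_alt
  rw [vwm_fold]
  rw [show (none : Option (Char × Char × Nat × Bool)) = vwmStOf [] from rfl,
      vwmScan_eq sentence.toList 0 [] []]
  have hwords : (PySem.Str.split₀ sentence).map (fun w => vwmIsValidL w.toList) =
      (PySem.Chars.split₀ sentence.toList).map vwmIsValidL := by
    rw [show ((fun w => vwmIsValidL w.toList) : String -> Bool) = vwmIsValidL ∘ String.toList from rfl,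
        ← List.map_map, PySem.Str.split₀_map_toList]
  rw [hwords]
  simp [PySem.Chars.split₀]
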